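-- pv_equiv track=rewrite | github.com/IvanPolitov/algorithms | alg.py | number_of_different_syllables
-- ===== SOURCE A (Python) =====
-- from typing import List, Tuple
--
-- def number_of_different_syllables(k: int) -> Tuple[int, List[int]]:
--     '''По данному числу найдите максимальное число k, для которого
--     n можно представить как сумму k различных натуральных слагаемых.
--     Пример:
--     Входные данные:
--     6
--     Выходные данные:
--     Число слагаемых и сами слагаемые
--     6
--     1 2 3
--     '''
--     res = []
--     for i in range(1, k+1):
--         if k - i < i + 1:
--             if k - i == 0:
--                 res.append(i)
--                 break
--             continue
--         k -= i
--         res.append(i)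
--     return len(res), res
-- ===== SOURCE B (Python) =====
-- from typing import List, Tuple
--
-- def number_of_different_syllables(k: int) -> Tuple[int, List[int]]:
--     if k <= 0:
--         return 0, []
--     # binary search for the largest m with m*(m+1)//2 <= k;
--     # invariant: lo*(lo+1)//2 <= k < hi*(hi+1)//2
--     lo, hi = 1, k + 1
--     while hi - lo > 1:
--         mid = (lo + hi) // 2
--         if mid * (mid + 1) // 2 <= k:
--             lo = mid
--         else:
--             hi = mid
--     return lo, list(range(1, lo)) + [k - lo * (lo - 1) // 2]
-- ===== Notes on version B (the rewrite author's own statement) =====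
-- stated objective: alternative
-- what changed: Replaces A's greedy scan that subtracts successive integers from a shrinking k (with continue/break) by a binary search over the triangular condition m*(m+1)//2 <= k to find the term count in O(log k), then emits the answer closed-form as list(range(1,m)) + [k - m*(m-1)//2].
import Mathlib
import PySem

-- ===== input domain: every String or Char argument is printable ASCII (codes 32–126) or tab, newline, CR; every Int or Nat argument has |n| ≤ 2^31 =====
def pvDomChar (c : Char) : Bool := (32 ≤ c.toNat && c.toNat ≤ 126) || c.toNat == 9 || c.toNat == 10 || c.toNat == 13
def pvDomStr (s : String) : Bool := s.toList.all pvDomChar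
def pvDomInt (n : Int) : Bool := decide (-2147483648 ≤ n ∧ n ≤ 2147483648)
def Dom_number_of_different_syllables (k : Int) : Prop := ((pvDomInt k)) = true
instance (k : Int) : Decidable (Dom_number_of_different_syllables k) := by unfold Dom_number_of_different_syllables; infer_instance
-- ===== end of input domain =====

-- B finds the term count by binary search on the triangular condition m*(m+1)//2 <= k
-- and emits the list closed-form, instead of A's greedy subtraction scan (objective: alternative).


-- ===== PORT A =====
-- A's loop over range(1, k+1) with mutable k/res and continue/break,
-- transcribed as structural recursion over the range list.
def pvLoopA : List Int → Int → List Int → List Int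
  | [], _, res => res
  | i :: rest, k, res =>
    if k - i < i + 1 then
      if k - i = 0 then res ++ [i]       -- append then break
      else pvLoopA rest k res            -- continue
    else pvLoopA rest (k - i) (res ++ [i])

def number_of_different_syllables (k : Int) : Int × List Int :=
  let res := pvLoopA (PySem.List.pyRange 1 (k + 1) 1) k []
  ((res.length : Int), res)

-- ===== PORT B =====
-- Source B's binary-search while loop: invariant lo*(lo+1)//2 <= k < hi*(hi+1)//2.
def pvBSearch (k lo hi : Int) : Int :=
  if _h : hi - lo > 1 then
    let mid := PySem.Int.floordiv (lo + hi) 2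
    if PySem.Int.floordiv (mid * (mid + 1)) 2 ≤ k then pvBSearch k mid hi
    else pvBSearch k lo mid
  else lo
termination_by (hi - lo).toNat
decreasing_by
  · have := (PySem.Int.floordiv_two_mid_bounds (show lo ≤ hi by omega)).2
    have h2 : lo + 1 ≤ PySem.Int.floordiv (lo + hi) 2 := by
      rw [PySem.Int.le_floordiv_iff_mul_le (by omega : (0:Int) < 2)]; omega
    omega
  · have := (PySem.Int.floordiv_two_mid_bounds (show lo ≤ hi by omega)).1
    have h2 : PySem.Int.floordiv (lo + hi) 2 < hi := by
      rw [PySem.Int.floordiv_lt_iff_lt_mul (by omega : (0:Int) < 2)]; omega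
    omega

def number_of_different_syllables_alt (k : Int) : Int × List Int :=
  if k ≤ 0 then (0, [])
  else
    let m := pvBSearch k 1 (k + 1)
    (m, PySem.List.pyRange 1 m 1 ++ [k - PySem.Int.floordiv (m * (m - 1)) 2])

-- ===== PRECONDITION & SPEC =====
def Spec_number_of_different_syllables (k : Int) (out : Int × List Int) : Prop := out = number_of_different_syllables_alt k
instance (k : Int) (out : Int × List Int) : Decidable (Spec_number_of_different_syllables k out) := by unfold Spec_number_of_different_syllables; infer_instance

-- ===== CLAIM (what is proved, stated in full; the proofs are below) =====
def Claim_equal_number_of_different_syllables : Prop := ∀ (k : Int), Dom_number_of_different_syllables k → Spec_number_of_different_syllables k (number_of_different_syllables k)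

-- ===== LEMMAS AND PROOFS =====

-- midpoint of a gap > 1 lies strictly between the ends
lemma pvMid_bounds (lo hi : Int) (h : hi - lo > 1) :
    lo < PySem.Int.floordiv (lo + hi) 2 ∧ PySem.Int.floordiv (lo + hi) 2 < hi := by
  constructor
  · have h2 : lo + 1 ≤ PySem.Int.floordiv (lo + hi) 2 := by
      rw [PySem.Int.le_floordiv_iff_mul_le (by omega : (0:Int) < 2)]; omega
    omega
  · rw [PySem.Int.floordiv_lt_iff_lt_mul (by omega : (0:Int) < 2)]; omega

-- x // 2 ≤ k ↔ x ≤ 2k+1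
lemma pvFd2_le (x k : Int) : PySem.Int.floordiv x 2 ≤ k ↔ x ≤ 2 * k + 1 := by
  have : PySem.Int.floordiv x 2 < k + 1 ↔ x < (k + 1) * 2 :=
    PySem.Int.floordiv_lt_iff_lt_mul (by omega : (0:Int) < 2)
  omega

-- x even: x // 2 is the exact half
lemma pvFd2_even (t : Int) : PySem.Int.floordiv (2 * t) 2 = t := by
  rw [PySem.Int.floordiv_eq_iff_of_pos (by omega : (0:Int) < 2)]; omega

-- binary search keeps the triangular bracket and returns the largest m with m(m+1) ≤ 2k
lemma pvBSearch_spec (n : ℕ) : ∀ (k lo hi : Int), (hi - lo).toNat ≤ n → lo < hi →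
    lo * (lo + 1) ≤ 2 * k → 2 * k < hi * (hi + 1) →
    lo ≤ pvBSearch k lo hi ∧
      (pvBSearch k lo hi) * (pvBSearch k lo hi + 1) ≤ 2 * k ∧
      2 * k < (pvBSearch k lo hi + 1) * (pvBSearch k lo hi + 2) := by
  induction n with
  | zero => intro k lo hi hn hlt _ _; omega
  | succ n ih =>
    intro k lo hi hn hlt hlo hhi
    rw [pvBSearch.eq_def]
    by_cases hgap : hi - lo > 1
    · rw [dif_pos hgap]
      obtain ⟨hm1, hm2⟩ := pvMid_bounds lo hi hgap
      set mid := PySem.Int.floordiv (lo + hi) 2 with hmid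
      have heven : ∃ t, mid * (mid + 1) = 2 * t := by
        rcases Int.even_mul_succ_self mid with ⟨t, ht⟩
        exact ⟨t, by omega⟩
      by_cases hc : PySem.Int.floordiv (mid * (mid + 1)) 2 ≤ k
      · rw [if_pos hc]
        have hle : mid * (mid + 1) ≤ 2 * k := by
          obtain ⟨t, ht⟩ := heven
          have := (pvFd2_le (mid * (mid + 1)) k).1 hc
          omega
        have := ih k mid hi (by omega) hm2 hle hhi
        exact ⟨by omega, this.2⟩
      · rw [if_neg hc]
        have hgt : 2 * k < mid * (mid + 1) := by
          have := (pvFd2_le (mid * (mid + 1)) k).not.1 hc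
          omega
        exact ih k lo mid (by omega) hm1 hlo hgt
    · rw [dif_neg hgap]
      have : hi = lo + 1 := by omega
      subst this
      have : (lo + 1) * (lo + 1 + 1) = (lo + 1) * (lo + 2) := by ring
      exact ⟨le_refl _, hlo, by omega⟩

-- break phase: once the residual r satisfies j ≤ r ≤ 2j, A only `continue`s
-- until index r, where it appends r and breaks.
lemma pvLoopA_break (n : ℕ) : ∀ (j r N : Int) (res : List Int),
    (r - j).toNat ≤ n → 1 ≤ j → j ≤ r → r ≤ 2 * j → r ≤ N →
    pvLoopA (PySem.List.pyRange j (N + 1) 1) r res = res ++ [r] := by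
  induction n with
  | zero =>
    intro j r N res hn h1 h2 h3 h4
    have hjr : r = j := by omega
    subst hjr
    rw [PySem.List.pyRange_one_cons (by omega)]
    rw [pvLoopA]
    rw [if_pos (show r - r < r + 1 by omega), if_pos (show r - r = 0 by omega)]
  | succ n ih =>
    intro j r N res hn h1 h2 h3 h4
    rcases eq_or_lt_of_le h2 with heq | hlt
    · subst heq
      rw [PySem.List.pyRange_one_cons (by omega)]
      rw [pvLoopA]
      rw [if_pos (show j - j < j + 1 by omega), if_pos (show j - j = 0 by omega)]
    · rw [PySem.List.pyRange_one_cons (by omega)]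
      rw [pvLoopA]
      rw [if_pos (show r - j < j + 1 by omega), if_neg (show ¬ r - j = 0 by omega)]
      exact ih (j + 1) r N res (by omega) (by omega) (by omega) (by omega) h4

-- main stage invariant: A's loop from index i with residual r = k - (i-1)i/2,
-- accumulated [1..i-1], where m is the largest count (m(m+1) ≤ 2k < (m+1)(m+2)),
-- ends as [1..m-1] ++ [k - m(m-1)//2].
lemma pvStage (n : ℕ) : ∀ (i r k m : Int), (m - i).toNat ≤ n →
    1 ≤ i → i ≤ m → 2 * r = 2 * k - i * (i - 1) →
    m * (m + 1) ≤ 2 * k → 2 * k < (m + 1) * (m + 2) →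
    pvLoopA (PySem.List.pyRange i (k + 1) 1) r (PySem.List.pyRange 1 i 1) =
      PySem.List.pyRange 1 m 1 ++ [k - PySem.Int.floordiv (m * (m - 1)) 2] := by
  induction n with
  | zero =>
    intro i r k m hn h1 h2 hr hm1 hm2
    have him : i = m := by omega
    subst him
    have hbound : 2 * r < 4 * i + 2 := by nlinarith
    have hge : 2 * i ≤ 2 * r := by nlinarith
    rw [pvLoopA_break (r - i).toNat i r k _ (le_refl _) h1 (by omega) (by omega) (by nlinarith)]
    have hfd : PySem.Int.floordiv (i * (i - 1)) 2 = k - r := by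
      have : i * (i - 1) = 2 * (k - r) := by omega
      rw [this, pvFd2_even]
    rw [hfd]
    congr 2
    omega
  | succ n ih =>
    intro i r k m hn h1 h2 hr hm1 hm2
    rcases eq_or_lt_of_le h2 with heq | hlt
    · subst heq
      have hbound : 2 * r < 4 * i + 2 := by nlinarith
      have hge : 2 * i ≤ 2 * r := by nlinarith
      rw [pvLoopA_break (r - i).toNat i r k _ (le_refl _) h1 (by omega) (by omega) (by nlinarith)]
      have hfd : PySem.Int.floordiv (i * (i - 1)) 2 = k - r := by
        have : i * (i - 1) = 2 * (k - r) := by omega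
        rw [this, pvFd2_even]
      rw [hfd]
      congr 2
      omega
    · -- i < m: the guard k-i < i+1 is false, A subtracts i and appends it
      have hmono : (i + 1) * (i + 2) ≤ m * (m + 1) := by
        have h0 : (0:Int) ≤ m - (i + 1) := by omega
        have h0' : (0:Int) ≤ m + i + 2 := by omega
        nlinarith [mul_nonneg h0 h0']
      have hbig : 2 * r ≥ 4 * i + 2 := by nlinarith
      have hik : i ≤ r - i := by omega
      have hrk : r ≤ k := by nlinarith
      rw [PySem.List.pyRange_one_cons (by omega)]
      rw [pvLoopA]
      rw [if_neg (show ¬ r - i < i + 1 by omega)]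
      rw [← PySem.List.pyRange_one_succ_right (show (1:Int) ≤ i by omega)]
      have hr' : 2 * (r - i) = 2 * k - (i + 1) * (i + 1 - 1) := by
        have : (i + 1) * i = i * (i - 1) + 2 * i := by ring
        have h2 : (i + 1) * (i + 1 - 1) = (i + 1) * i := by ring
        omega
      exact ih (i + 1) (r - i) k m (by omega) (by omega) (by omega) hr' hm1 hm2

-- ===== VERDICT (by name: the statement is the Claim_ definition above) =====
theorem number_of_different_syllables_spec : Claim_equal_number_of_different_syllables := by
  intro k _
  unfold Spec_number_of_different_syllables number_of_different_syllables
    number_of_different_syllables_alt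
  by_cases hk : k ≤ 0
  · rw [PySem.List.pyRange_one_eq_nil (by omega)]
    simp [pvLoopA, hk]
  · rw [if_neg hk]
    have hinit2 : 2 * k < (k + 1) * (k + 1 + 1) := by nlinarith
    obtain ⟨hm0, hm1, hm2⟩ := pvBSearch_spec (k + 1 - 1).toNat k 1 (k + 1) (le_refl _)
      (by omega) (by omega) hinit2
    set m := pvBSearch k 1 (k + 1) with hm
    have hmain := pvStage (m - 1).toNat 1 k k m (le_refl _) (le_refl _) hm0
      (by ring) hm1 hm2
    rw [PySem.List.pyRange_one_eq_nil (le_refl (1:Int))] at hmain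
    simp only []
    rw [hmain]
    refine Prod.ext ?_ rfl
    simp [PySem.List.length_pyRange_one]
    omega
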